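-- pv_equiv track=rewrite | github.com/jabb1123/ABCStack | MorseTranslator.py | morse2signal
-- ===== SOURCE A (Python) =====
-- morse2sig = {'-': (3, 1), '.': (1, 1), ' ': (1, 0)}
--
-- def morse2signal(morse):
--     signal = []
--     for char in morse:
--         for ditdah in char:
--             signal = ellide(signal, morse2sig[ditdah])
--
--             # Add a (1, 0) packet after each dit or dah
--             signal = ellide(signal, (1, 0))
--
--         # Add a (2,0) packet between characters
--         signal = ellide(signal, (2, 0))
--
--     return signal
--
-- def ellide(signal, packet):
--     """
--     Helper for morse2signal which appends a zero-packet (eg. (1,0))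
--     to the end of the list or combines it with the previous packet if the
--     previous packet was also a zero-packet.
--     """
--
--     # if the last packet was a zero packet
--     if signal and not signal[-1][1] and not packet[1]:
--         # then combine the current packet with the previous packet
--         signal[-1] = (signal[-1][0] + packet[0], 0)
--     else:
--         signal.append(packet)
--
--     return signal
-- ===== SOURCE B (Python) =====
-- MORSE2SIG = {'-': (3, 1), '.': (1, 1), ' ': (1, 0)}
--
-- def morse2signal(morse):
--     # Phase 1: flat packet stream, no merging.
--     raw = [p for char in morse
--              for p in [q for d in char for q in (MORSE2SIG[d], (1, 0))] + [(2, 0)]]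
--     # Phase 2: coalesce maximal runs of zero packets, one right-to-left pass.
--     out = []
--     for n, v in reversed(raw):
--         if v == 0 and out and out[-1][1] == 0:
--             out[-1] = (n + out[-1][0], 0)
--         else:
--             out.append((n, v))
--     out.reverse()
--     return out
-- ===== Notes on version B (the rewrite author's own statement) =====
-- stated objective: alternative
-- what changed: B splits the work into two passes: phase 1 emits the flat, unmerged packet stream (a flat comprehension over chars), phase 2 coalesces maximal runs of zero packets in one right-to-left sweep, instead of A's incremental ellide-merge after every single append.
import Mathlib
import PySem

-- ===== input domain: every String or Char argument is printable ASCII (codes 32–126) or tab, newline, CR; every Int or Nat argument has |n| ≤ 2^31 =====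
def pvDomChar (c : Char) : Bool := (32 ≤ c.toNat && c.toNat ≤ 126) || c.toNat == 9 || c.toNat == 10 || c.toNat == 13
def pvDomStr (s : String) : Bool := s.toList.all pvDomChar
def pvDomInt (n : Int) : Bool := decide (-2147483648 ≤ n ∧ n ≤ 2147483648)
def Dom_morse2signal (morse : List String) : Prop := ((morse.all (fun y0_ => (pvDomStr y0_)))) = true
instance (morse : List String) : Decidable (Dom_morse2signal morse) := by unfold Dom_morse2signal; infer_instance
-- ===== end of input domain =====

-- B separates packet generation (a flat flatMap pass) from run-length compression of zero
-- packets (one right-to-left pass), instead of A's incremental ellide-merge after every append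
-- (objective: alternative decomposition, same asymptotic cost).

-- ===== PORT A =====
-- module constant morse2sig (same literal in Source A and Source B; shared by both ports)
def morse2sig : PySem.Dict Char (Int × Int) :=
  PySem.Dict.ofList [('-', (3, 1)), ('.', (1, 1)), (' ', (1, 0))]

-- dict lookup morse2sig[ditdah]: none = KeyError, those inputs are excluded by Pre_;
-- the (0, 0) default is never reached inside Pre_.
def ellide (signal : List (Int × Int)) (packet : Int × Int) : List (Int × Int) :=
  match signal.getLast? with
  | some last =>
      if last.2 = 0 ∧ packet.2 = 0 then
        signal.dropLast ++ [(last.1 + packet.1, 0)]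
      else signal ++ [packet]
  | none => signal ++ [packet]

def morse2signal (morse : List String) : List (Int × Int) :=
  morse.foldl (fun signal char =>
    ellide (char.toList.foldl (fun sg ditdah =>
      ellide (ellide sg ((morse2sig.get? ditdah).getD (0, 0))) (1, 0)) signal) (2, 0)) []

-- ===== PORT B =====
-- Phase 1 of Source B: the flat packet stream, no merging (lookup default as in port A).
def rawPackets (morse : List String) : List (Int × Int) :=
  morse.flatMap (fun char =>
    (char.toList.flatMap (fun d => [(morse2sig.get? d).getD (0, 0), (1, 0)])) ++ [(2, 0)])

-- Phase 2 of Source B: one loop over reversed(raw); Python appends at the end of `out`,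
-- modeled here by prepending (Lean head = Python out[-1]), so Python's final
-- out.reverse() makes the Lean accumulator itself the result.
def mergeZero (out : List (Int × Int)) (p : Int × Int) : List (Int × Int) :=
  match out with
  | q :: t => if p.2 = 0 ∧ q.2 = 0 then (p.1 + q.1, 0) :: t else p :: q :: t
  | [] => [p]

def morse2signal_alt (morse : List String) : List (Int × Int) :=
  (rawPackets morse).reverse.foldl mergeZero []

-- ===== PRECONDITION & SPEC =====
-- Pre_ excludes exactly the inputs containing a character other than '-', '.' or ' ',
-- on which Python A raises KeyError (B raises there too).
def Pre_morse2signal (morse : List String) : Prop :=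
  (morse.all (fun s => s.toList.all (fun c => c == '-' || c == '.' || c == ' '))) = true
instance (morse : List String) : Decidable (Pre_morse2signal morse) := by
  unfold Pre_morse2signal; infer_instance

def pvWitness_morse2signal : List String := [".-", " ", "--"]

def Spec_morse2signal (morse : List String) (out : List (Int × Int)) : Prop := out = morse2signal_alt morse
instance (morse : List String) (out : List (Int × Int)) : Decidable (Spec_morse2signal morse out) := by unfold Spec_morse2signal; infer_instance

-- ===== CLAIM (what is proved, stated in full; the proofs are below) =====
def Claim_equal_morse2signal : Prop := ∀ (morse : List String), Dom_morse2signal morse → Pre_morse2signal morse → Spec_morse2signal morse (morse2signal morse)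

-- ===== LEMMAS AND PROOFS =====

-- A's ellide (merge at the END of the list), transported to reversed lists.
def stepA (out : List (Int × Int)) (p : Int × Int) : List (Int × Int) :=
  match out with
  | q :: t => if q.2 = 0 ∧ p.2 = 0 then (q.1 + p.1, 0) :: t else p :: q :: t
  | [] => [p]

-- canonical right-to-left compressor (what B's reversed fold computes)
def comp (l : List (Int × Int)) : List (Int × Int) :=
  l.foldr (fun p out => mergeZero out p) []

lemma ellide_reverse (r : List (Int × Int)) (p : Int × Int) :
    ellide r.reverse p = (stepA r p).reverse := by
  cases r with
  | nil => simp [ellide, stepA]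
  | cons q t =>
      simp only [ellide, stepA, List.reverse_cons, List.getLast?_concat, List.dropLast_concat]
      split_ifs with h <;> simp

lemma foldl_ellide_reverse (l : List (Int × Int)) :
    ∀ acc : List (Int × Int), List.foldl ellide acc.reverse l = (List.foldl stepA acc l).reverse := by
  induction l with
  | nil => intro acc; simp
  | cons p l ih =>
      intro acc
      simp only [List.foldl_cons, ellide_reverse, ← ih (stepA acc p)]

-- merge a reversed prefix with an already-compressed suffix
def M (accRev out : List (Int × Int)) : List (Int × Int) :=
  match accRev, out with
  | q :: t, r :: u =>
      if q.2 = 0 ∧ r.2 = 0 then t.reverse ++ (q.1 + r.1, 0) :: u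
      else (q :: t).reverse ++ r :: u
  | a, o => a.reverse ++ o

lemma M_step (acc c : List (Int × Int)) (p : Int × Int) :
    M (stepA acc p) c = M acc (mergeZero c p) := by
  obtain ⟨n, v⟩ := p
  by_cases hv : v = 0
  · subst hv
    cases acc with
    | nil =>
        cases c with
        | nil => simp [stepA, mergeZero, M]
        | cons r u =>
            by_cases hr : r.2 = 0 <;> simp [stepA, mergeZero, M, hr]
    | cons q t =>
        by_cases hq : q.2 = 0
        · cases c with
          | nil => simp [stepA, mergeZero, M, hq]
          | cons r u =>
              by_cases hr : r.2 = 0 <;>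
                simp [stepA, mergeZero, M, hq, hr, add_assoc]
        · cases c with
          | nil => simp [stepA, mergeZero, M, hq]
          | cons r u =>
              by_cases hr : r.2 = 0 <;> simp [stepA, mergeZero, M, hq, hr]
  · cases acc with
    | nil => cases c <;> simp [stepA, mergeZero, M, hv]
    | cons q t =>
        cases c with
        | nil => simp [stepA, mergeZero, M, hv]
        | cons r u => simp [stepA, mergeZero, M, hv]

lemma foldl_stepA_eq_M (l : List (Int × Int)) :
    ∀ acc : List (Int × Int), (List.foldl stepA acc l).reverse = M acc (comp l) := by
  induction l with
  | nil => intro acc; cases acc <;> simp [comp, M]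
  | cons p l ih =>
      intro acc
      have : comp (p :: l) = mergeZero (comp l) p := rfl
      rw [List.foldl_cons, ih (stepA acc p), this, M_step]

lemma foldl_ellide_eq_comp (l : List (Int × Int)) :
    List.foldl ellide [] l = comp l := by
  have h := foldl_ellide_reverse l []
  simp only [List.reverse_nil] at h
  rw [h, foldl_stepA_eq_M l []]
  cases hc : comp l <;> simp [M]

-- A's nested loops are a single ellide-fold over the flat packet stream
lemma inner_fold (cs : List Char) :
    ∀ acc : List (Int × Int),
      cs.foldl (fun sg d => ellide (ellide sg ((morse2sig.get? d).getD (0, 0))) (1, 0)) acc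
        = List.foldl ellide acc (cs.flatMap (fun d => [(morse2sig.get? d).getD (0, 0), (1, 0)])) := by
  induction cs with
  | nil => intro acc; simp
  | cons c cs ih =>
      intro acc
      simp only [List.flatMap_cons, List.cons_append, List.nil_append, List.foldl_cons]
      exact ih _

lemma outer_fold (morse : List String) :
    ∀ acc : List (Int × Int),
      morse.foldl (fun signal char =>
        ellide (char.toList.foldl (fun sg d =>
          ellide (ellide sg ((morse2sig.get? d).getD (0, 0))) (1, 0)) signal) (2, 0)) acc
        = List.foldl ellide acc (rawPackets morse) := by
  induction morse with
  | nil => intro acc; simp [rawPackets]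
  | cons s morse ih =>
      intro acc
      simp only [List.foldl_cons, rawPackets, List.flatMap_cons, List.foldl_append, ih]
      rw [inner_fold]
      simp

-- ===== VERDICT (by name: the statement is the Claim_ definition above) =====
theorem morse2signal_spec : Claim_equal_morse2signal := by
  intro morse _ _
  unfold Spec_morse2signal morse2signal morse2signal_alt
  rw [outer_fold morse [], foldl_ellide_eq_comp, comp, ← List.foldr_reverse]
  simp
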